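-- pv_equiv track=rewrite | github.com/marty777/adventofcode2020 | src/day17.py | dimensions2
-- ===== SOURCE A (Python) =====
-- def dimensions2(gridA):
--     min_w = max_w = min_z = max_z = min_y = max_y = min_x = max_x = 0
--     for w in gridA:
--         if w < min_w:
--             min_w = w
--         elif w > max_w:
--             max_w = w
--         for z in gridA[w]:
--             if z < min_z:
--                 min_z = z
--             elif z > max_z:
--                 max_z = z
--             for y in gridA[w][z]:
--                 if y < min_y:
--                     min_y = y
--                 elif y > max_y:
--                     max_y = y
--                 for x in gridA[w][z][y]:
--                     if x < min_x:
--                         min_x = x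
--                     elif x > max_x:
--                         max_x = x
--     return min_w, max_w, min_z, max_z, min_y, max_y, min_x, max_x
-- ===== SOURCE B (Python) =====
-- def dimensions2(gridA):
--     ws = list(gridA)
--     zs = [z for zd in gridA.values() for z in zd]
--     ys = [y for zd in gridA.values() for yd in zd.values() for y in yd]
--     xs = [x for zd in gridA.values() for yd in zd.values() for xd in yd.values() for x in xd]
--     return (min([0] + ws), max([0] + ws),
--             min([0] + zs), max([0] + zs),
--             min([0] + ys), max([0] + ys),
--             min([0] + xs), max([0] + xs))
-- ===== Notes on version B (the rewrite author's own statement) =====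
-- stated objective: simpler
-- what changed: Replaces the single fused nested loop with running if/elif comparisons by a collect-then-reduce decomposition: gather each dimension's keys via comprehensions, then take the minimum and maximum of each key list together with zero, correct because the running minimum never exceeds zero and the running maximum never falls below it.
import Mathlib
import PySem

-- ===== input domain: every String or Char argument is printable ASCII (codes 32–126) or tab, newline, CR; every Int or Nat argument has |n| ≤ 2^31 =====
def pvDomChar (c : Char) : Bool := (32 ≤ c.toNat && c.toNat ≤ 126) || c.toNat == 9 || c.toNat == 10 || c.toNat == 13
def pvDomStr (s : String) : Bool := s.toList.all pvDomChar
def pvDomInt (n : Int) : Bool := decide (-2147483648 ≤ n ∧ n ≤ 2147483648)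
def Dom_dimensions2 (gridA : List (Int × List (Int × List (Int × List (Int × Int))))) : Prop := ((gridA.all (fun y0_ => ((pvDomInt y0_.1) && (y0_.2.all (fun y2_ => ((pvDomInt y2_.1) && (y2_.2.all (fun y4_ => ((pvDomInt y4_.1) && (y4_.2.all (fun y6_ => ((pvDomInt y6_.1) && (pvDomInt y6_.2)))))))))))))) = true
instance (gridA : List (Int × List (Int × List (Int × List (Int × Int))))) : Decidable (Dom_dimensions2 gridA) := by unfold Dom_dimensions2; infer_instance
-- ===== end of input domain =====

-- B replaces A's fused nested loop with running if/elif comparisons by a collect-then-reduce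
-- decomposition (gather each dimension's keys, then min([0]+keys)/max([0]+keys)); objective: simpler.

-- ===== PORT A =====
-- A's `if v < mn: mn = v elif v > mx: mx = v` update of one dimension's running (min, max) pair.
def pvStep (s : Int × Int) (v : Int) : Int × Int :=
  if v < s.1 then (v, s.2) else if v > s.2 then (s.1, v) else s

-- State is ((min_w, max_w), (min_z, max_z), (min_y, max_y), (min_x, max_x)); the nested `for`
-- loops over the dict keys become nested foldl over the association-list pairs.
def dimensions2 (gridA : List (Int × List (Int × List (Int × List (Int × Int))))) : Int × Int × Int × Int × Int × Int × Int × Int :=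
  let st :=
    gridA.foldl (fun st wp =>
      (pvStep st.1 wp.1,
       wp.2.foldl (fun r zp =>
         (pvStep r.1 zp.1,
          zp.2.foldl (fun r2 yp =>
            (pvStep r2.1 yp.1,
             yp.2.foldl (fun sx xp => pvStep sx xp.1) r2.2)) r.2)) st.2))
      ((0, 0), (0, 0), (0, 0), (0, 0))
  (st.1.1, st.1.2, st.2.1.1, st.2.1.2, st.2.2.1.1, st.2.2.1.2, st.2.2.2.1, st.2.2.2.2)

-- ===== PORT B =====
-- Source B: collect each dimension's keys, then min([0]+keys) / max([0]+keys) per dimension.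
def dimensions2_alt (gridA : List (Int × List (Int × List (Int × List (Int × Int))))) : Int × Int × Int × Int × Int × Int × Int × Int :=
  let ws := gridA.map Prod.fst
  let zs := gridA.flatMap (fun wp => wp.2.map Prod.fst)
  let ys := gridA.flatMap (fun wp => wp.2.flatMap (fun zp => zp.2.map Prod.fst))
  let xs := gridA.flatMap (fun wp => wp.2.flatMap (fun zp => zp.2.flatMap (fun yp => yp.2.map Prod.fst)))
  (ws.foldl min 0, ws.foldl max 0,
   zs.foldl min 0, zs.foldl max 0,
   ys.foldl min 0, ys.foldl max 0,
   xs.foldl min 0, xs.foldl max 0)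

-- ===== PRECONDITION & SPEC =====
def Spec_dimensions2 (gridA : List (Int × List (Int × List (Int × List (Int × Int))))) (out : Int × Int × Int × Int × Int × Int × Int × Int) : Prop := out = dimensions2_alt gridA
instance (gridA : List (Int × List (Int × List (Int × List (Int × Int))))) (out : Int × Int × Int × Int × Int × Int × Int × Int) : Decidable (Spec_dimensions2 gridA out) := by
  unfold Spec_dimensions2
  -- instance search stops at the default size limit on the 8-fold product; build the term
  exact @instDecidableEqProd Int _ _
    (@instDecidableEqProd Int _ _
      (@instDecidableEqProd Int _ _
        (inferInstance : DecidableEq (Int × Int × Int × Int × Int)))) out (dimensions2_alt gridA)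

-- ===== CLAIM (what is proved, stated in full; the proofs are below) =====
def Claim_equal_dimensions2 : Prop := ∀ (gridA : List (Int × List (Int × List (Int × List (Int × Int))))), Dom_dimensions2 gridA → Spec_dimensions2 gridA (dimensions2 gridA)

-- ===== LEMMAS AND PROOFS =====

theorem foldl_min_le (l : List Int) (s : Int) : l.foldl min s ≤ s := by
  induction l generalizing s with
  | nil => exact le_refl s
  | cons a t ih => exact le_trans (ih (min s a)) (min_le_left s a)

theorem le_foldl_max (l : List Int) (s : Int) : s ≤ l.foldl max s := by
  induction l generalizing s with
  | nil => exact le_refl s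
  | cons a t ih => exact le_trans (le_max_left s a) (ih (max s a))

theorem pvStep_eq (s : Int × Int) (v : Int) (h : s.1 ≤ s.2) :
    pvStep s v = (min s.1 v, max s.2 v) := by
  unfold pvStep
  rcases s with ⟨mn, mx⟩
  simp only at h ⊢
  split_ifs with h1 h2 <;> simp <;> omega

-- x level: A's innermost loop equals per-component min/max folds over the keys.
theorem foldx_eq (l : List (Int × Int)) (s : Int × Int) (h : s.1 ≤ s.2) :
    l.foldl (fun sx xp => pvStep sx xp.1) s
      = ((l.map Prod.fst).foldl min s.1, (l.map Prod.fst).foldl max s.2) := by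
  induction l generalizing s with
  | nil => simp
  | cons a t ih =>
    simp only [List.foldl_cons, List.map_cons]
    rw [pvStep_eq s a.1 h]
    exact ih (min s.1 a.1, max s.2 a.1)
      (le_trans (min_le_left _ _) (le_trans h (le_max_left _ _)))

-- y level.
theorem foldy_eq (l : List (Int × List (Int × Int))) (s : (Int × Int) × (Int × Int))
    (h1 : s.1.1 ≤ s.1.2) (h2 : s.2.1 ≤ s.2.2) :
    l.foldl (fun r2 yp => (pvStep r2.1 yp.1, yp.2.foldl (fun sx xp => pvStep sx xp.1) r2.2)) s
      = (((l.map Prod.fst).foldl min s.1.1, (l.map Prod.fst).foldl max s.1.2),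
         ((l.flatMap (fun yp => yp.2.map Prod.fst)).foldl min s.2.1,
          (l.flatMap (fun yp => yp.2.map Prod.fst)).foldl max s.2.2)) := by
  induction l generalizing s with
  | nil => simp
  | cons a t ih =>
    simp only [List.foldl_cons, List.map_cons, List.flatMap_cons, List.foldl_append]
    rw [pvStep_eq s.1 a.1 h1, foldx_eq a.2 s.2 h2]
    exact ih ((min s.1.1 a.1, max s.1.2 a.1),
              ((a.2.map Prod.fst).foldl min s.2.1, (a.2.map Prod.fst).foldl max s.2.2))
      (le_trans (min_le_left _ _) (le_trans h1 (le_max_left _ _)))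
      (le_trans (foldl_min_le _ _) (le_trans h2 (le_foldl_max _ _)))

-- z level.
theorem foldz_eq (l : List (Int × List (Int × List (Int × Int))))
    (s : (Int × Int) × (Int × Int) × (Int × Int))
    (h1 : s.1.1 ≤ s.1.2) (h2 : s.2.1.1 ≤ s.2.1.2) (h3 : s.2.2.1 ≤ s.2.2.2) :
    l.foldl (fun r zp =>
        (pvStep r.1 zp.1,
         zp.2.foldl (fun r2 yp => (pvStep r2.1 yp.1, yp.2.foldl (fun sx xp => pvStep sx xp.1) r2.2)) r.2)) s
      = (((l.map Prod.fst).foldl min s.1.1, (l.map Prod.fst).foldl max s.1.2),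
         ((l.flatMap (fun zp => zp.2.map Prod.fst)).foldl min s.2.1.1,
          (l.flatMap (fun zp => zp.2.map Prod.fst)).foldl max s.2.1.2),
         ((l.flatMap (fun zp => zp.2.flatMap (fun yp => yp.2.map Prod.fst))).foldl min s.2.2.1,
          (l.flatMap (fun zp => zp.2.flatMap (fun yp => yp.2.map Prod.fst))).foldl max s.2.2.2)) := by
  induction l generalizing s with
  | nil => simp
  | cons a t ih =>
    simp only [List.foldl_cons, List.map_cons, List.flatMap_cons, List.foldl_append]
    rw [pvStep_eq s.1 a.1 h1, foldy_eq a.2 s.2 h2 h3]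
    exact ih ((min s.1.1 a.1, max s.1.2 a.1),
              ((a.2.map Prod.fst).foldl min s.2.1.1, (a.2.map Prod.fst).foldl max s.2.1.2),
              ((a.2.flatMap (fun yp => yp.2.map Prod.fst)).foldl min s.2.2.1,
               (a.2.flatMap (fun yp => yp.2.map Prod.fst)).foldl max s.2.2.2))
      (le_trans (min_le_left _ _) (le_trans h1 (le_max_left _ _)))
      (le_trans (foldl_min_le _ _) (le_trans h2 (le_foldl_max _ _)))
      (le_trans (foldl_min_le _ _) (le_trans h3 (le_foldl_max _ _)))

-- w level.
theorem foldw_eq (l : List (Int × List (Int × List (Int × List (Int × Int)))))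
    (s : (Int × Int) × (Int × Int) × (Int × Int) × (Int × Int))
    (h1 : s.1.1 ≤ s.1.2) (h2 : s.2.1.1 ≤ s.2.1.2) (h3 : s.2.2.1.1 ≤ s.2.2.1.2) (h4 : s.2.2.2.1 ≤ s.2.2.2.2) :
    l.foldl (fun st wp =>
        (pvStep st.1 wp.1,
         wp.2.foldl (fun r zp =>
           (pvStep r.1 zp.1,
            zp.2.foldl (fun r2 yp => (pvStep r2.1 yp.1, yp.2.foldl (fun sx xp => pvStep sx xp.1) r2.2)) r.2)) st.2)) s
      = (((l.map Prod.fst).foldl min s.1.1, (l.map Prod.fst).foldl max s.1.2),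
         ((l.flatMap (fun wp => wp.2.map Prod.fst)).foldl min s.2.1.1,
          (l.flatMap (fun wp => wp.2.map Prod.fst)).foldl max s.2.1.2),
         ((l.flatMap (fun wp => wp.2.flatMap (fun zp => zp.2.map Prod.fst))).foldl min s.2.2.1.1,
          (l.flatMap (fun wp => wp.2.flatMap (fun zp => zp.2.map Prod.fst))).foldl max s.2.2.1.2),
         ((l.flatMap (fun wp => wp.2.flatMap (fun zp => zp.2.flatMap (fun yp => yp.2.map Prod.fst)))).foldl min s.2.2.2.1,
          (l.flatMap (fun wp => wp.2.flatMap (fun zp => zp.2.flatMap (fun yp => yp.2.map Prod.fst)))).foldl max s.2.2.2.2)) := by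
  induction l generalizing s with
  | nil => simp
  | cons a t ih =>
    simp only [List.foldl_cons, List.map_cons, List.flatMap_cons, List.foldl_append]
    rw [pvStep_eq s.1 a.1 h1, foldz_eq a.2 s.2 h2 h3 h4]
    exact ih _
      (le_trans (min_le_left _ _) (le_trans h1 (le_max_left _ _)))
      (le_trans (foldl_min_le _ _) (le_trans h2 (le_foldl_max _ _)))
      (le_trans (foldl_min_le _ _) (le_trans h3 (le_foldl_max _ _)))
      (le_trans (foldl_min_le _ _) (le_trans h4 (le_foldl_max _ _)))

-- ===== VERDICT (by name: the statement is the Claim_ definition above) =====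
theorem dimensions2_spec : Claim_equal_dimensions2 := by
  intro gridA _
  unfold Spec_dimensions2
  simp only [dimensions2, dimensions2_alt]
  rw [foldw_eq gridA ((0,0),(0,0),(0,0),(0,0)) (le_refl 0) (le_refl 0) (le_refl 0) (le_refl 0)]
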